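-- pv_equiv track=rewrite | github.com/BrPetrus/adventofcode | 2024/day1/solver.py | solve
-- ===== SOURCE A (Python) =====
-- from typing import Tuple, List
--
-- Data = Tuple[List[int], List[int]]
--
-- def solve(data: Data) -> Tuple[int, int]:
--     a, b = data
--     a.sort(reverse=True)
--     b.sort(reverse=True)
--
--     # Part 1
--     sum = 0
--
--     for i,j in zip(a, b):
--         sum += abs(i-j)
--
--     # Part 2
--     freq = {}
--     similarity = 0
--     for x in b:
--         freq[x] = freq.get(x, 0) + 1
--     for x in a:
--         similarity += x * freq.get(x, 0)
--
--     return sum, similarity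
-- ===== SOURCE B (Python) =====
-- from typing import Tuple, List
--
-- Data = Tuple[List[int], List[int]]
--
-- def solve(data: Data) -> Tuple[int, int]:
--     a, b = data
--     a.sort(reverse=True)
--     b.sort(reverse=True)
--
--     # Part 1: sum of pairwise absolute differences of the two sorted lists
--     total = sum(abs(i - j) for i, j in zip(a, b))
--
--     # Part 2: no hash table at all -- a two-pointer run-length merge of the two
--     # DESCENDING-sorted lists; each common value v contributes v * (run in a) * (run in b)
--     similarity = 0
--     i, j, n, m = 0, 0, len(a), len(b)
--     while i < n and j < m:
--         if a[i] > b[j]: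
--             i += 1
--         elif a[i] < b[j]:
--             j += 1
--         else:
--             v = a[i]
--             ci = 0
--             while i < n and a[i] == v:
--                 ci += 1
--                 i += 1
--             cj = 0
--             while j < m and b[j] == v:
--                 cj += 1
--                 j += 1
--             similarity += v * ci * cj
--     return total, similarity
-- ===== Notes on version B (the rewrite author's own statement) =====
-- stated objective: alternative
-- what changed: Part 2 drops the frequency dictionary entirely: since both lists are already sorted for part 1, similarity is computed by a two-pointer run-length merge of the two descending-sorted lists, each common value v contributing v*(run length in a)*(run length in b); part 1 becomes a generator-sum over the zipped sorted lists. Both versions sort the arguments in place (same side effect).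
import Mathlib
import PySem

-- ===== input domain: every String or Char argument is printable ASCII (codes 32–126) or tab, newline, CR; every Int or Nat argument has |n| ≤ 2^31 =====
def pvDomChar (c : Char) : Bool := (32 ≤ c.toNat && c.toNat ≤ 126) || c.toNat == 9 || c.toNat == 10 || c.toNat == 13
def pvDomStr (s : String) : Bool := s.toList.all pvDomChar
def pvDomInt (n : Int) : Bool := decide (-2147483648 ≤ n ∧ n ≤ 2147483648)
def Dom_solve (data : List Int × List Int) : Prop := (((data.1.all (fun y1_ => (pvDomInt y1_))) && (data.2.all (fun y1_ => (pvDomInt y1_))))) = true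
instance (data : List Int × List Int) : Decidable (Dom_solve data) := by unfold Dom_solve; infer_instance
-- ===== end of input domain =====

-- B replaces A's frequency dictionary by a two-pointer run-length merge of the two descending-sorted
-- lists (alternative decomposition, same cost). Equivalence is about the RETURN value; both Pythons
-- additionally reverse-sort the two argument lists in place (same side effect in A and B).

-- ===== PORT A =====
def solve (data : List Int × List Int) : Int × Int :=
  let a := PySem.List.sorted data.1 (fun x => x) true
  let b := PySem.List.sorted data.2 (fun x => x) true
  let sum := (a.zip b).foldl (fun s p => s + |p.1 - p.2|) 0
  let freq := b.foldl (fun d x => d.insert x (d.getD x 0 + 1)) PySem.Dict.empty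
  let similarity := a.foldl (fun s x => s + x * freq.getD x 0) 0
  (sum, similarity)

-- ===== PORT B =====
-- the inner 'while i < n and a[i] == v: ci += 1; i += 1' loop: run length, and the rest of the list
def runLen (v : Int) : List Int → Int
  | [] => 0
  | x :: xs => if x = v then runLen v xs + 1 else 0

def dropRun (v : Int) : List Int → List Int
  | [] => []
  | x :: xs => if x = v then dropRun v xs else x :: xs

lemma dropRun_length_le (v : Int) (l : List Int) : (dropRun v l).length ≤ l.length := by
  induction l with
  | nil => simp [dropRun]
  | cons x xs ih => simp only [dropRun]; split <;> simp [Nat.le_succ_of_le ih]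

-- the outer two-pointer 'while i < n and j < m' loop of Source B
def mergeSim : List Int → List Int → Int
  | [], _ => 0
  | _ :: _, [] => 0
  | x :: xs, y :: ys =>
    if x > y then mergeSim xs (y :: ys)
    else if x < y then mergeSim (x :: xs) ys
    else
      let ci := runLen x (x :: xs)
      let cj := runLen x (y :: ys)
      x * ci * cj + mergeSim (dropRun x (x :: xs)) (dropRun x (y :: ys))
termination_by a b => a.length + b.length
decreasing_by
  all_goals
    have h1 := dropRun_length_le x xs
    have h2 := dropRun_length_le x (y :: ys)
    simp only [dropRun, reduceIte, List.length_cons] at *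
    omega

def solve_alt (data : List Int × List Int) : Int × Int :=
  let a := PySem.List.sorted data.1 (fun x => x) true
  let b := PySem.List.sorted data.2 (fun x => x) true
  let total := ((a.zip b).map (fun p => |p.1 - p.2|)).sum
  let similarity := mergeSim a b
  (total, similarity)

-- ===== PRECONDITION & SPEC =====
def Spec_solve (data : List Int × List Int) (out : Int × Int) : Prop := out = solve_alt data
instance (data : List Int × List Int) (out : Int × Int) : Decidable (Spec_solve data out) := by unfold Spec_solve; infer_instance

-- ===== CLAIM =====
def Claim_equal_solve : Prop := ∀ (data : List Int × List Int), Dom_solve data → Spec_solve data (solve data)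

-- ===== LEMMAS AND PROOFS =====

lemma dropRun_sublist (v : Int) (l : List Int) : (dropRun v l).Sublist l := by
  induction l with
  | nil => simp [dropRun]
  | cons x xs ih =>
    simp only [dropRun]
    split
    · exact ih.trans (List.sublist_cons_self x xs)
    · exact List.Sublist.refl _

-- splitting a sum over a list at its leading run of v's (true for ANY list)
lemma sum_split_run (v : Int) (f : Int → Int) (l : List Int) :
    (l.map f).sum = runLen v l * f v + ((dropRun v l).map f).sum := by
  induction l with
  | nil => simp [runLen, dropRun]
  | cons x xs ih =>
    simp only [runLen, dropRun, List.map_cons, List.sum_cons]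
    split
    · rename_i h; subst h; rw [ih]; ring
    · simp [List.sum_cons]

lemma not_mem_dropRun (v : Int) (l : List Int) (hl : l.Pairwise (fun p q => q ≤ p))
    (hle : ∀ y ∈ l, y ≤ v) : v ∉ dropRun v l := by
  induction l with
  | nil => simp [dropRun]
  | cons x xs ih =>
    simp only [dropRun]
    rw [List.pairwise_cons] at hl
    split
    · exact ih hl.2 (fun y hy => hle y (List.mem_cons_of_mem x hy))
    · rename_i hxv
      intro hv
      rcases List.mem_cons.mp hv with h | h
      · exact hxv h.symm
      · have h1 := hl.1 v h
        have h2 := hle x (List.mem_cons_self)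
        exact hxv (le_antisymm h2 h1)

lemma count_eq_runLen (v : Int) (l : List Int) (h : v ∉ dropRun v l) :
    (l.count v : Int) = runLen v l := by
  induction l with
  | nil => simp [runLen]
  | cons x xs ih =>
    simp only [runLen]
    split
    · rename_i hx; subst hx
      simp only [dropRun, reduceIte] at h
      rw [List.count_cons_self, ← ih h]; push_cast; ring
    · rename_i hx
      simp only [dropRun, if_neg hx] at h
      have : v ∉ x :: xs := h
      simp [List.count_eq_zero_of_not_mem this]

lemma count_dropRun (v x : Int) (l : List Int) (hx : x ≠ v) :
    (dropRun v l).count x = l.count x := by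
  induction l with
  | nil => simp [dropRun]
  | cons y ys ih =>
    simp only [dropRun]
    split
    · rename_i hy; subst hy
      rw [ih]; simp [Ne.symm hx]
    · rfl

theorem mergeSim_eq (a b : List Int) (ha : a.Pairwise (fun p q => q ≤ p))
    (hb : b.Pairwise (fun p q => q ≤ p)) :
    mergeSim a b = (a.map (fun x => x * (b.count x : Int))).sum := by
  match a, b with
  | [], b => simp [mergeSim]
  | x :: xs, [] => simp [mergeSim]
  | x :: xs, y :: ys =>
    rw [List.pairwise_cons] at ha hb
    by_cases hgt : x > y
    · -- all of b ≤ y < x, so b.count x = 0 and the head term vanishes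
      have hx0 : (y :: ys).count x = 0 := by
        apply List.count_eq_zero_of_not_mem
        intro hmem
        rcases List.mem_cons.mp hmem with h | h
        · omega
        · have := hb.1 x h; omega
      rw [mergeSim, if_pos hgt,
        mergeSim_eq xs (y :: ys) ha.2 (List.pairwise_cons.mpr hb)]
      simp [hx0]
    · by_cases hlt : x < y
      · -- y is larger than everything in a, so counting against ys is the same
        rw [mergeSim, if_neg hgt, if_pos hlt,
          mergeSim_eq (x :: xs) ys (List.pairwise_cons.mpr ha) hb.2]
        apply congrArg
        apply List.map_congr_left
        intro z hz
        have hzx : z ≤ x := by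
          rcases List.mem_cons.mp hz with h | h
          · omega
          · exact ha.1 z h
        rw [List.count_cons_of_ne (by omega)]
      · -- x = y = v : the run-length case
        have hxy : x = y := by omega
        subst hxy
        rw [mergeSim, if_neg hgt, if_neg hlt]
        have haP : (x :: xs).Pairwise (fun p q => q ≤ p) := List.pairwise_cons.mpr ha
        have hbP : (x :: ys).Pairwise (fun p q => q ≤ p) := List.pairwise_cons.mpr hb
        have hale : ∀ z ∈ x :: xs, z ≤ x := by
          intro z hz; rcases List.mem_cons.mp hz with h | h
          · omega
          · exact ha.1 z h
        have hble : ∀ z ∈ x :: ys, z ≤ x := by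
          intro z hz; rcases List.mem_cons.mp hz with h | h
          · omega
          · exact hb.1 z h
        have hna : x ∉ dropRun x (x :: xs) := not_mem_dropRun x _ haP hale
        have hnb : x ∉ dropRun x (x :: ys) := not_mem_dropRun x _ hbP hble
        have hrec := mergeSim_eq (dropRun x (x :: xs)) (dropRun x (x :: ys))
          (haP.sublist (dropRun_sublist x _)) (hbP.sublist (dropRun_sublist x _))
        rw [hrec]
        rw [sum_split_run x (fun z => z * ((x :: ys).count z : Int)) (x :: xs)]
        rw [count_eq_runLen x (x :: ys) hnb]
        have hmap : ((dropRun x (x :: xs)).map (fun z => z * (((x :: ys)).count z : Int))) =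
            ((dropRun x (x :: xs)).map (fun z => z * ((dropRun x (x :: ys)).count z : Int))) := by
          apply List.map_congr_left
          intro z hz
          have hz_ne : z ≠ x := fun h => hna (h ▸ hz)
          rw [count_dropRun x z (x :: ys) hz_ne]
        rw [hmap]
        ring
termination_by a.length + b.length
decreasing_by
  all_goals
    have h1 := dropRun_length_le x xs
    have h2 := dropRun_length_le x (x :: ys)
    simp only [dropRun, reduceIte, List.length_cons] at *
    omega

-- ===== VERDICT =====
theorem solve_spec : Claim_equal_solve := by
  intro data _
  unfold Spec_solve solve solve_alt
  simp only [PySem.List.foldl_add, PySem.Dict.foldl_insert_getD_add_one_eq_counter,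
    PySem.Dict.getD_counter, zero_add]
  refine Prod.ext rfl ?_
  rw [mergeSim_eq _ _ (PySem.List.sorted_pairwise_rev _ _) (PySem.List.sorted_pairwise_rev _ _)]
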